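-- pv_equiv track=rewrite | github.com/Khamel83/atlas | scripts/maintenance/diagnostic_analysis.py | determine_root_cause
-- ===== SOURCE A (Python) =====
-- def determine_root_cause(issues, db_analysis, job_analysis, cross_ref):
--     """Determine the actual root cause"""
--     if not issues:
--         return "No issues detected"
--
--     # Check specific patterns
--     if any(issue['type'] == 'MASSIVE_DUPLICATION' for issue in issues):
--         return "SUBMISSION_LOGIC_NOT_CHECKING_EXISTING_JOBS"
--
--     if any(issue['type'] == 'DATABASE_SYNC_ISSUE' for issue in issues):
--         return "DATABASE_STATUS_NOT_UPDATED_AFTER_SUBMISSION"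
--
--     if any(issue['type'] == 'DUPLICATION_LOGIC_ERROR' for issue in issues):
--         return "DEDUPLICATION_LOGIC_INSUFFICIENT"
--
--     return "UNKNOWN_MULTIPLE_FACTORS"
-- ===== SOURCE B (Python) =====
-- # B: one fold over issues computing the minimum priority rank, then index a label table.
-- _RANK = {'MASSIVE_DUPLICATION': 0, 'DATABASE_SYNC_ISSUE': 1, 'DUPLICATION_LOGIC_ERROR': 2}
-- _LABELS = ["SUBMISSION_LOGIC_NOT_CHECKING_EXISTING_JOBS",
--            "DATABASE_STATUS_NOT_UPDATED_AFTER_SUBMISSION",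
--            "DEDUPLICATION_LOGIC_INSUFFICIENT",
--            "UNKNOWN_MULTIPLE_FACTORS"]
--
-- def determine_root_cause(issues, db_analysis, job_analysis, cross_ref):
--     """Determine the actual root cause"""
--     if not issues:
--         return "No issues detected"
--     best = 3
--     for issue in issues:
--         r = _RANK.get(issue['type'], 3)
--         if r < best:
--             best = r
--     return _LABELS[best]
-- ===== Notes on version B (the rewrite author's own statement) =====
-- stated objective: alternative
-- what changed: Replaces the chain of three any() priority scans by a single fold that maps each issue type to a numeric rank and keeps the minimum, then indexes a label table by the best rank.
import Mathlib
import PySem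

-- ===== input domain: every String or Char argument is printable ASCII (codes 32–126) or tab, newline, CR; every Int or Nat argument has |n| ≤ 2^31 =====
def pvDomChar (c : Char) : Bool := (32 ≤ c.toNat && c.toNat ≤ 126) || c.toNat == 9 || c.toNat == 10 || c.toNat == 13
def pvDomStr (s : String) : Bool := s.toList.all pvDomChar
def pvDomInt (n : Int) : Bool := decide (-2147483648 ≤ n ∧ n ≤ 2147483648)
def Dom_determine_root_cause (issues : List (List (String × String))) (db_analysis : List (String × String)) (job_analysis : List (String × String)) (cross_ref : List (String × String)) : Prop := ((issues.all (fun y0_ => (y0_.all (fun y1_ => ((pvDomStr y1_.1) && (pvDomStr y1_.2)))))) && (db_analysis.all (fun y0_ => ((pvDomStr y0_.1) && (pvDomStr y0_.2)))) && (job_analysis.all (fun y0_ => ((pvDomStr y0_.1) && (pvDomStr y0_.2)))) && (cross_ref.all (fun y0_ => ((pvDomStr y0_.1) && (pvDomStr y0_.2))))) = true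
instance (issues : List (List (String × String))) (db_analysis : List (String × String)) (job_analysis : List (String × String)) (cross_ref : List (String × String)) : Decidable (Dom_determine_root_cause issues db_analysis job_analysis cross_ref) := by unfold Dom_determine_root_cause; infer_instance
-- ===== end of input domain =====

-- B replaces A's chain of any() priority scans by a single min-rank fold over the
-- issues plus an indexed label table (objective: alternative algorithm, same cost).

-- issue['type'] as a total lookup: first match in the association list; Pre_ guarantees the key exists.
def drcType (d : List (String × String)) : String :=
  ((d.find? (fun kv => kv.1 == "type")).map Prod.snd).getD ""

-- ===== PORT A =====
def determine_root_cause (issues : List (List (String × String))) (db_analysis : List (String × String)) (job_analysis : List (String × String)) (cross_ref : List (String × String)) : String :=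
  if issues.isEmpty then "No issues detected"
  else if issues.any (fun issue => drcType issue == "MASSIVE_DUPLICATION") then
    "SUBMISSION_LOGIC_NOT_CHECKING_EXISTING_JOBS"
  else if issues.any (fun issue => drcType issue == "DATABASE_SYNC_ISSUE") then
    "DATABASE_STATUS_NOT_UPDATED_AFTER_SUBMISSION"
  else if issues.any (fun issue => drcType issue == "DUPLICATION_LOGIC_ERROR") then
    "DEDUPLICATION_LOGIC_INSUFFICIENT"
  else "UNKNOWN_MULTIPLE_FACTORS"

-- ===== PORT B =====
-- _RANK.get(t, 3) of Source B
def drcRank (t : String) : Nat :=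
  if t == "MASSIVE_DUPLICATION" then 0
  else if t == "DATABASE_SYNC_ISSUE" then 1
  else if t == "DUPLICATION_LOGIC_ERROR" then 2
  else 3

def drcLabels : List String :=
  ["SUBMISSION_LOGIC_NOT_CHECKING_EXISTING_JOBS",
   "DATABASE_STATUS_NOT_UPDATED_AFTER_SUBMISSION",
   "DEDUPLICATION_LOGIC_INSUFFICIENT",
   "UNKNOWN_MULTIPLE_FACTORS"]

def determine_root_cause_alt (issues : List (List (String × String))) (db_analysis : List (String × String)) (job_analysis : List (String × String)) (cross_ref : List (String × String)) : String :=
  if issues.isEmpty then "No issues detected"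
  else
    let best := issues.foldl
      (fun b issue => let r := drcRank (drcType issue); if r < b then r else b) 3
    drcLabels.getD best "UNKNOWN_MULTIPLE_FACTORS"   -- best ≤ 3 always, so _LABELS[best] never raises

-- ===== PRECONDITION & SPEC =====
-- Pre_ excludes inputs where some issue dict lacks the 'type' key: Python A raises KeyError on
-- them unless an earlier issue short-circuits the scan, and B's fold raises there.
def Pre_determine_root_cause (issues : List (List (String × String))) (db_analysis : List (String × String)) (job_analysis : List (String × String)) (cross_ref : List (String × String)) : Prop :=
  issues.all (fun d => (d.find? (fun kv => kv.1 == "type")).isSome) = true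
instance (issues : List (List (String × String))) (db_analysis : List (String × String)) (job_analysis : List (String × String)) (cross_ref : List (String × String)) : Decidable (Pre_determine_root_cause issues db_analysis job_analysis cross_ref) := by unfold Pre_determine_root_cause; infer_instance

def pvWitness_determine_root_cause : (List (List (String × String))) × (List (String × String)) × (List (String × String)) × (List (String × String)) :=
  ([[("type", "DATABASE_SYNC_ISSUE")], [("type", "OTHER")]], [], [], [])

def Spec_determine_root_cause (issues : List (List (String × String))) (db_analysis : List (String × String)) (job_analysis : List (String × String)) (cross_ref : List (String × String)) (out : String) : Prop := out = determine_root_cause_alt issues db_analysis job_analysis cross_ref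
instance (issues : List (List (String × String))) (db_analysis : List (String × String)) (job_analysis : List (String × String)) (cross_ref : List (String × String)) (out : String) : Decidable (Spec_determine_root_cause issues db_analysis job_analysis cross_ref out) := by unfold Spec_determine_root_cause; infer_instance

-- ===== CLAIM (what is proved, stated in full; the proofs are below) =====
def Claim_equal_determine_root_cause : Prop := ∀ (issues : List (List (String × String))) (db_analysis : List (String × String)) (job_analysis : List (String × String)) (cross_ref : List (String × String)), Dom_determine_root_cause issues db_analysis job_analysis cross_ref → Pre_determine_root_cause issues db_analysis job_analysis cross_ref → Spec_determine_root_cause issues db_analysis job_analysis cross_ref (determine_root_cause issues db_analysis job_analysis cross_ref)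

-- ===== LEMMAS AND PROOFS =====

-- B's running 'if r < b then r else b' is min
theorem drc_step_min (b r : Nat) : (if r < b then r else b) = min b r := by
  rw [Nat.min_def]; split_ifs <;> omega

-- pull the accumulator out of a min-fold
theorem drc_foldl_min_acc (l : List (List (String × String))) :
    ∀ a b : Nat,
      l.foldl (fun acc i => min acc (drcRank (drcType i))) (min a b)
        = min a (l.foldl (fun acc i => min acc (drcRank (drcType i))) b) := by
  induction l with
  | nil => intro a b; simp
  | cons i t ih =>
      intro a b
      simp only [List.foldl_cons, Nat.min_assoc]
      exact ih a (min b (drcRank (drcType i)))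

-- the min-rank fold is exactly A's if-chain of any() scans, as a rank
theorem drc_best_char (l : List (List (String × String))) :
    l.foldl (fun acc i => min acc (drcRank (drcType i))) 3
      = (if l.any (fun i => drcType i == "MASSIVE_DUPLICATION") then 0
         else if l.any (fun i => drcType i == "DATABASE_SYNC_ISSUE") then 1
         else if l.any (fun i => drcType i == "DUPLICATION_LOGIC_ERROR") then 2
         else 3) := by
  induction l with
  | nil => simp
  | cons i t ih =>
      have hr : drcRank (drcType i) ≤ 3 := by
        unfold drcRank; split_ifs <;> omega
      have h3 : min 3 (drcRank (drcType i)) = min (drcRank (drcType i)) 3 :=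
        Nat.min_comm _ _
      simp only [List.foldl_cons, h3]
      have := drc_foldl_min_acc t (drcRank (drcType i)) 3
      rw [this, ih]
      by_cases e1 : drcType i == "MASSIVE_DUPLICATION"
      · simp [e1, drcRank]
      · by_cases e2 : drcType i == "DATABASE_SYNC_ISSUE"
        · by_cases h1 : t.any (fun i => drcType i == "MASSIVE_DUPLICATION") <;>
            (simp [e1, e2, h1, drcRank]; try (split_ifs <;> omega))
        · by_cases e3 : drcType i == "DUPLICATION_LOGIC_ERROR"
          · by_cases h1 : t.any (fun i => drcType i == "MASSIVE_DUPLICATION") <;>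
              by_cases h2 : t.any (fun i => drcType i == "DATABASE_SYNC_ISSUE") <;>
                (simp [e1, e2, e3, h1, h2, drcRank]; try (split_ifs <;> omega))
          · by_cases h1 : t.any (fun i => drcType i == "MASSIVE_DUPLICATION") <;>
              by_cases h2 : t.any (fun i => drcType i == "DATABASE_SYNC_ISSUE") <;>
                by_cases h3' : t.any (fun i => drcType i == "DUPLICATION_LOGIC_ERROR") <;>
                  simp [e1, e2, e3, h1, h2, h3', drcRank]

-- ===== VERDICT (by name: the statement is the Claim_ definition above) =====
theorem determine_root_cause_spec : Claim_equal_determine_root_cause := by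
  intro issues db_analysis job_analysis cross_ref _ _
  unfold Spec_determine_root_cause determine_root_cause determine_root_cause_alt
  by_cases h : issues.isEmpty
  · simp [h]
  · have hstep : (fun (b : Nat) (issue : List (String × String)) =>
        let r := drcRank (drcType issue); if r < b then r else b)
        = (fun acc i => min acc (drcRank (drcType i))) := by
      funext b i; exact drc_step_min b (drcRank (drcType i))
    simp only [h, Bool.false_eq_true, if_false, hstep, drc_best_char]
    by_cases h1 : issues.any (fun issue => drcType issue == "MASSIVE_DUPLICATION") <;>
      by_cases h2 : issues.any (fun issue => drcType issue == "DATABASE_SYNC_ISSUE") <;>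
        by_cases h3 : issues.any (fun issue => drcType issue == "DUPLICATION_LOGIC_ERROR") <;>
          simp [h1, h2, h3, drcLabels]
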